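-- pv_equiv track=rewrite | github.com/jieun-lim/alg-python-random | 1주차/29717.py | find_level
-- ===== SOURCE A (Python) =====
-- def find_level(N:int) -> int:
--     """
--     몬스터 킬수가 들어오면 몇 레벨 상승했는지 이분 탐색으로 반환해주는 함수
--     - 경험치의 합:  n(n+1)
--     :param N:
--     :return:
--     level: 상승 레벨 수
--     """
--     cur_exp = N * (N + 1) // 2 # 현재 나의 경험치 누적값, N은 죽인 몬스터의 수
--     l, r = 1, 10**9
--     level = 0
--     while l <= r:
--         m = (l + r) // 2
--         need = m*(m + 1)
--         if cur_exp >= need: # 경험치가 충분하면 더 높은 레벨로 업뎃 가능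
--             level = m
--             l = m + 1
--         else:
--             r = m - 1
--     return level
-- ===== SOURCE B (Python) =====
-- import math
--
--
-- def find_level(N: int) -> int:
--     C = N * (N + 1) // 2
--     m = (math.isqrt(4 * C + 1) - 1) // 2
--     return min(m, 10**9)
-- ===== Notes on version B (the rewrite author's own statement) =====
-- stated objective: simpler
-- what changed: Replaces A's ~30-iteration binary search loop over [1,10^9] with the exact integer closed form m = (isqrt(4C+1)-1)//2 for C = N(N+1)//2, capped with min(m, 10^9) to match A's search range.
import Mathlib
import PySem

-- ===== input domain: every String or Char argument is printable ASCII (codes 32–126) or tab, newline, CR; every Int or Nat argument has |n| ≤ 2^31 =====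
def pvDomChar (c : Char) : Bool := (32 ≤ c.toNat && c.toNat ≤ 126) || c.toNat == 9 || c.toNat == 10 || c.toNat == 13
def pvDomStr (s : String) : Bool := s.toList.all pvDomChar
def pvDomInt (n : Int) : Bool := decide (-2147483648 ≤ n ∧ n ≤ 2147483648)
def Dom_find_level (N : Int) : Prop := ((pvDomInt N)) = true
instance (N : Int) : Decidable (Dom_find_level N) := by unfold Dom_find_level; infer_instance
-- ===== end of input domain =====

-- B replaces A's binary search with the exact integer closed form m = (isqrt(4C+1)-1)//2
-- (capped at 10^9 like A's search range); objective: simpler, no loop.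

-- ===== PORT A =====
-- the while-loop of A: state (l, r, level), literal transliteration
def findLoopA (C l r level : Int) : Int :=
  if _h : l ≤ r then
    let m := PySem.Int.floordiv (l + r) 2
    if C ≥ m * (m + 1) then findLoopA C (m + 1) r m
    else findLoopA C l (m - 1) level
  else level
termination_by (r + 1 - l).toNat
decreasing_by
  · have := PySem.Int.floordiv_two_mid_bounds _h
    omega
  · have := PySem.Int.floordiv_two_mid_bounds _h
    omega

def find_level (N : Int) : Int :=
  let cur_exp := PySem.Int.floordiv (N * (N + 1)) 2
  findLoopA cur_exp 1 (10 ^ 9) 0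

-- ===== PORT B =====
-- math.isqrt ported as Nat.sqrt (exact integer square root)
def find_level_alt (N : Int) : Int :=
  let C := PySem.Int.floordiv (N * (N + 1)) 2
  let m := PySem.Int.floordiv ((Nat.sqrt (4 * C + 1).toNat : Int) - 1) 2
  min m (10 ^ 9)

-- ===== PRECONDITION & SPEC =====
def Spec_find_level (N : Int) (out : Int) : Prop := out = find_level_alt N
instance (N : Int) (out : Int) : Decidable (Spec_find_level N out) := by unfold Spec_find_level; infer_instance

-- ===== CLAIM (what is proved, stated in full; the proofs are below) =====
def Claim_equal_find_level : Prop := ∀ (N : Int), Dom_find_level N → Spec_find_level N (find_level N)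

-- ===== LEMMAS AND PROOFS =====

-- m ↦ m*(m+1) is monotone on nonnegative integers
theorem mul_succ_mono {x y : Int} (hx : 0 ≤ x) (hxy : x ≤ y) :
    x * (x + 1) ≤ y * (y + 1) := by nlinarith

-- A's binary search returns any b characterised as: 0 ≤ b ≤ 10^9, b(b+1) ≤ C,
-- and either b hits the cap or (b+1)(b+2) > C.
theorem findLoopA_eq (C b : Int) (hb0 : 0 ≤ b) (hb1 : b * (b + 1) ≤ C)
    (hb2 : b = 10 ^ 9 ∨ C < (b + 1) * (b + 2)) :
    ∀ (l r level : Int), 1 ≤ l → r ≤ 10 ^ 9 → level < l → level ≤ b →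
    (level = b ∨ (l ≤ b ∧ b ≤ r)) → findLoopA C l r level = b := by
  intro l r level
  induction l, r, level using findLoopA.induct C with
  | case1 l r level hlr m hcond ih =>
    intro hl hr hll hlev hinv
    have hmdef : PySem.Int.floordiv (l + r) 2 = m := rfl
    obtain ⟨hml, hmr⟩ := PySem.Int.floordiv_two_mid_bounds hlr
    rw [findLoopA]
    simp only [hlr, dite_true, hmdef]
    rw [if_pos hcond]
    -- taken branch: m*(m+1) ≤ C, so m ≤ b
    have hmb : m ≤ b := by
      by_contra hgt
      push Not at hgt
      rcases hb2 with hcap | hlt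
      · omega
      · have : (b + 1) * (b + 2) ≤ m * (m + 1) := by nlinarith
        omega
    apply ih (by omega) hr (by omega) hmb
    rcases hinv with h | ⟨h1, h2⟩
    · left; omega
    · by_cases hbm : b ≤ m
      · left; omega
      · right; omega
  | case2 l r level hlr m hcond ih =>
    intro hl hr hll hlev hinv
    have hmdef : PySem.Int.floordiv (l + r) 2 = m := rfl
    obtain ⟨hml, hmr⟩ := PySem.Int.floordiv_two_mid_bounds hlr
    rw [findLoopA]
    simp only [hlr, dite_true, hmdef]
    rw [if_neg hcond]
    -- untaken branch: C < m*(m+1), so b < m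
    have hbm : b < m := by
      by_contra hge
      push Not at hge
      have := mul_succ_mono (x := m) (y := b) (by omega) hge
      omega
    apply ih hl (by omega) hll hlev
    rcases hinv with h | ⟨h1, h2⟩
    · left; exact h
    · right; omega
  | case3 l r level hlr =>
    intro hl hr hll hlev hinv
    rw [findLoopA]
    simp only [hlr, dite_false]
    rcases hinv with h | ⟨h1, h2⟩
    · exact h
    · omega

theorem find_level_spec : Claim_equal_find_level := by
  intro N _
  unfold Spec_find_level find_level find_level_alt
  set C := PySem.Int.floordiv (N * (N + 1)) 2 with hCdef
  have hNN : 0 ≤ N * (N + 1) := by nlinarith [sq_nonneg (2 * N + 1)]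
  have hC0 : 0 ≤ C := by
    rw [hCdef, PySem.Int.floordiv_eq_ediv_of_pos (by norm_num)]
    exact Int.ediv_nonneg hNN (by norm_num)
  -- properties of the isqrt-based closed form
  set t : Nat := (4 * C + 1).toNat with htdef
  set s : Nat := Nat.sqrt t with hsdef
  have ht : (t : Int) = 4 * C + 1 := by omega
  have hs1 : (s : Nat) * s ≤ t := by simpa [pow_two] using Nat.sqrt_le' t
  have hs2 : t < (s + 1) * (s + 1) := by simpa [pow_two, Nat.succ_eq_add_one] using Nat.lt_succ_sqrt' t
  have hspos : 1 ≤ s := by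
    rcases Nat.eq_zero_or_pos s with h | h
    · exfalso; rw [h] at hs2; simp at hs2; omega
    · exact h
  set m : Int := PySem.Int.floordiv ((s : Int) - 1) 2 with hmdef
  have hm2 : 2 * m ≤ (s : Int) - 1 ∧ (s : Int) - 1 < 2 * m + 2 := by
    rw [hmdef, PySem.Int.floordiv_eq_ediv_of_pos (by norm_num)]
    omega
  have hm0 : 0 ≤ m := by omega
  -- m*(m+1) ≤ C : from (2m+1)^2 ≤ s^2 ≤ 4C+1
  have hmle : m * (m + 1) ≤ C := by
    have h1 : (2 * m + 1) * (2 * m + 1) ≤ (s : Int) * (s : Int) := by nlinarith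
    have h2 : (s : Int) * (s : Int) ≤ 4 * C + 1 := by
      rw [← ht]; exact_mod_cast hs1
    nlinarith
  -- C < (m+1)*(m+2) : from 4C+1 < (s+1)^2 ≤ (2m+3)^2
  have hmgt : C < (m + 1) * (m + 2) := by
    have h1 : (4 * C + 1 : Int) < ((s : Int) + 1) * ((s : Int) + 1) := by
      rw [← ht]; exact_mod_cast hs2
    have h2 : ((s : Int) + 1) * ((s : Int) + 1) ≤ (2 * m + 3) * (2 * m + 3) := by nlinarith
    nlinarith
  -- the returned value b = min m 10^9 satisfies the loop characterisation
  set b : Int := min m (10 ^ 9) with hbdef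
  have hb0 : 0 ≤ b := by
    rw [hbdef]; exact le_min hm0 (by norm_num)
  have hble : b ≤ m := min_le_left ..
  have hb1 : b * (b + 1) ≤ C :=
    le_trans (mul_succ_mono hb0 hble) hmle
  have hb2 : b = 10 ^ 9 ∨ C < (b + 1) * (b + 2) := by
    by_cases hcap : m ≤ 10 ^ 9
    · right
      have : b = m := min_eq_left hcap
      rw [this]; exact hmgt
    · left
      rw [hbdef]; exact min_eq_right (by omega)
  apply findLoopA_eq C b hb0 hb1 hb2 1 (10 ^ 9) 0 (by norm_num) (by norm_num)
    (by norm_num) hb0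
  rcases eq_or_lt_of_le hb0 with h | h
  · left; omega
  · right
    constructor
    · omega
    · exact min_le_right ..
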